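-- pv_equiv track=rewrite | github.com/Kvvvvvvvvv/email_reconnaissance | modules1/breach_check.py | _calculate_severity_level
-- ===== SOURCE A (Python) =====
-- from typing import Dict, List, Any
--
-- def _calculate_severity_level(breaches: List[Dict[str, Any]]) -> str:
--     """Calculate overall severity level"""
--     if not breaches:
--         return 'none'
--
--     severities = [breach.get('severity', 'medium') for breach in breaches]
--
--     if 'critical' in severities:
--         return 'critical'
--     elif 'high' in severities:
--         return 'high'
--     elif 'medium' in severities:
--         return 'medium'
--     else:
--         return 'low'
-- ===== SOURCE B (Python) =====
-- def _calculate_severity_level(breaches):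
--     """Calculate overall severity level: single max-accumulation pass instead of four membership scans."""
--     if not breaches:
--         return 'none'
--     rank = {'critical': 3, 'high': 2, 'medium': 1, 'low': 0}
--     best = 0
--     for breach in breaches:
--         best = max(best, rank.get(breach.get('severity', 'medium'), 0))
--     labels = ['low', 'medium', 'high', 'critical']
--     return labels[best]
-- ===== Notes on version B (the rewrite author's own statement) =====
-- stated objective: idiomatic
-- what changed: Replaces the list comprehension plus four ordered membership scans with a single pass that keeps a running maximum severity rank and maps it back to a label.
import Mathlib
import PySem

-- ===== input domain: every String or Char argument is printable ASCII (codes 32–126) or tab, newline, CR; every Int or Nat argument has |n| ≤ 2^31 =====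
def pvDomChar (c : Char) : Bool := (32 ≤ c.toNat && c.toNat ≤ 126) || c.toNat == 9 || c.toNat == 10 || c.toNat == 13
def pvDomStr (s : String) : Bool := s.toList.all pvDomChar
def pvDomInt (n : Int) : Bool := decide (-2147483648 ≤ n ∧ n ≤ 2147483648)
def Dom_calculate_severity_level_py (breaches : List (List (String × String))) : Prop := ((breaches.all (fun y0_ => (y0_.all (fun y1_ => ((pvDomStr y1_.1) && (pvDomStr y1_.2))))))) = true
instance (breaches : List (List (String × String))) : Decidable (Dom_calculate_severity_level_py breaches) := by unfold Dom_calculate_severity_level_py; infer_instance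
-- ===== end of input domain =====

-- B replaces A's four ordered membership scans over a severities list with a single
-- max-of-rank accumulation pass; objective: idiomatic (same O(n) cost).


-- ===== PORT A =====
def calculate_severity_level_py (breaches : List (List (String × String))) : String :=
  if breaches = [] then "none"
  else
    let severities := breaches.map (fun breach => (PySem.Dict.mk breach).getD "severity" "medium")
    if "critical" ∈ severities then "critical"
    else if "high" ∈ severities then "high"
    else if "medium" ∈ severities then "medium"
    else "low"

-- ===== PORT B =====
-- rank.get(s, 0) on the literal rank dict
def pvRank (s : String) : Int :=
  (PySem.Dict.mk [("critical", 3), ("high", 2), ("medium", 1), ("low", 0)]).getD s 0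

def calculate_severity_level_py_alt (breaches : List (List (String × String))) : String :=
  if breaches = [] then "none"
  else
    let best := breaches.foldl
      (fun m breach => max m (pvRank ((PySem.Dict.mk breach).getD "severity" "medium"))) 0
    -- labels[best]: best is provably within 0..3, so pyGet? is some; the getD "" default is unreachable
    (PySem.List.pyGet? (["low", "medium", "high", "critical"] : List String) best).getD ""

-- ===== PRECONDITION & SPEC =====
def Spec_calculate_severity_level_py (breaches : List (List (String × String))) (out : String) : Prop := out = calculate_severity_level_py_alt breaches
instance (breaches : List (List (String × String))) (out : String) : Decidable (Spec_calculate_severity_level_py breaches out) := by unfold Spec_calculate_severity_level_py; infer_instance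

-- ===== CLAIM (what is proved, stated in full; the proofs are below) =====
def Claim_equal_calculate_severity_level_py : Prop := ∀ (breaches : List (List (String × String))), Dom_calculate_severity_level_py breaches → Spec_calculate_severity_level_py breaches (calculate_severity_level_py breaches)

-- ===== LEMMAS AND PROOFS =====

-- pvRank as a plain if-chain on string equality
theorem pvRank_spec (s : String) :
    pvRank s = if "critical" = s then 3 else if "high" = s then 2 else if "medium" = s then 1 else 0 := by
  by_cases h1 : "critical" = s
  · subst h1; decide
  by_cases h2 : "high" = s
  · subst h2; decide
  by_cases h3 : "medium" = s
  · subst h3; decide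
  have n1 : ("critical" == s) = false := by simpa [beq_iff_eq] using h1
  have n2 : ("high" == s) = false := by simpa [beq_iff_eq] using h2
  have n3 : ("medium" == s) = false := by simpa [beq_iff_eq] using h3
  unfold pvRank
  rw [PySem.Dict.getD_eq_get?_getD]
  simp only [PySem.Dict.get?_mk_cons, n1, n2, n3, if_false, Bool.false_eq_true]
  by_cases h4 : "low" = s
  · simp [h4.symm]
  · have n4 : ("low" == s) = false := by simpa [beq_iff_eq] using h4
    simp [h1, h2, h3, n4, PySem.Dict.get?]

-- the running maximum over a severity list, characterised by the membership chain
theorem fold_char (l : List String) :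
    ∀ a : Int, 0 ≤ a →
      l.foldl (fun m s => max m (pvRank s)) a =
        max a (if "critical" ∈ l then 3 else if "high" ∈ l then 2 else if "medium" ∈ l then 1 else 0) := by
  induction l with
  | nil => intro a ha; simp [max_eq_left ha]
  | cons s rest ih =>
    intro a ha
    simp only [List.foldl_cons, List.mem_cons]
    rw [ih (max a (pvRank s)) (le_max_of_le_left ha), pvRank_spec s]
    by_cases hc : "critical" = s <;> by_cases hh : "high" = s <;> by_cases hm : "medium" = s <;>
      by_cases hcr : "critical" ∈ rest <;> by_cases hhr : "high" ∈ rest <;> by_cases hmr : "medium" ∈ rest <;>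
        simp [hc, hh, hm, hcr, hhr, hmr] <;> omega

-- ===== VERDICT (by name: the statement is the Claim_ definition above) =====
theorem calculate_severity_level_py_spec : Claim_equal_calculate_severity_level_py := by
  intro breaches _
  unfold Spec_calculate_severity_level_py calculate_severity_level_py calculate_severity_level_py_alt
  by_cases hnil : breaches = []
  · simp [hnil]
  · simp only [hnil, if_false]
    rw [show breaches.foldl
          (fun m breach => max m (pvRank ((PySem.Dict.mk breach).getD "severity" "medium"))) 0
        = (breaches.map (fun breach => (PySem.Dict.mk breach).getD "severity" "medium")).foldl
          (fun m s => max m (pvRank s)) 0 from (List.foldl_map (f := fun breach => (PySem.Dict.mk breach).getD "severity" "medium") (g := fun m s => max m (pvRank s)) (l := breaches) (init := 0)).symm]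
    rw [fold_char _ 0 le_rfl]
    set l := breaches.map (fun breach => (PySem.Dict.mk breach).getD "severity" "medium") with hl
    by_cases hc : "critical" ∈ l <;> by_cases hh : "high" ∈ l <;> by_cases hm : "medium" ∈ l <;>
      norm_num [hc, hh, hm] <;> rfl
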